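-- pv_equiv track=rewrite | github.com/niewdziad/find_longest_word | find_longest_word.py | get_longest_word_idx
-- ===== SOURCE A (Python) =====
-- def get_longest_word_idx(string_):
--     words = string_.split()  # Dzieli ciąg znaków na słowa
--     longest_word = ""
--     longest_word_index = -1
--
--     for idx, word in enumerate(words):
--         if len(word) > len(longest_word):
--             longest_word = word
--             longest_word_index = idx
--
--     return longest_word, longest_word_index
-- ===== SOURCE B (Python) =====
-- def get_longest_word_idx(string_):
--     words = string_.split()
--     if not words:
--         return "", -1
--     pairs = sorted(enumerate(words), key=lambda p: -len(p[1]))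
--     idx, word = pairs[0]
--     return word, idx
-- ===== Notes on version B (the rewrite author's own statement) =====
-- stated objective: alternative
-- what changed: Replaces the single-pass best-so-far loop by a staged pipeline: enumerate the words, stable-sort the pairs by negative word length (descending), and take the head; stability of the sort makes the earliest index win ties, matching the strict greater-than rule of A.
import Mathlib
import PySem

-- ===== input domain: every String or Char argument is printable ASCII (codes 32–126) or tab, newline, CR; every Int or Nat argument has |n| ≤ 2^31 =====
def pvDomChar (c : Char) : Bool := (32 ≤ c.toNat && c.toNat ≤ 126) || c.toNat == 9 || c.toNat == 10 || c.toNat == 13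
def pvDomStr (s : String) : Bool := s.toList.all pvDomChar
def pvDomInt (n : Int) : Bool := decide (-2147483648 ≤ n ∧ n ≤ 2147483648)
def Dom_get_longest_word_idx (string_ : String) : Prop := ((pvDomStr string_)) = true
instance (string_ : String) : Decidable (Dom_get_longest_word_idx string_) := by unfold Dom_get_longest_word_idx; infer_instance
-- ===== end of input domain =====

-- B replaces A's best-so-far loop by a staged pipeline: enumerate, stable sort by negative word length, take the head; same result, alternative algorithm.


-- ===== PORT A =====
-- A's for-loop over enumerate(words) with state (longest_word, longest_word_index)
def getLWIloop : List (Int × String) → String → Int → String × Int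
  | [], longest_word, longest_word_index => (longest_word, longest_word_index)
  | (idx, word) :: rest, longest_word, longest_word_index =>
      if PySem.Str.len word > PySem.Str.len longest_word then
        getLWIloop rest word idx
      else
        getLWIloop rest longest_word longest_word_index

def get_longest_word_idx (string_ : String) : String × Int :=
  getLWIloop (PySem.List.enumerate (PySem.Str.split₀ string_) 0) "" (-1)

-- ===== PORT B =====
-- Source B: sort enumerate(words) stably by -len(word), then pairs[0] (nonempty list guarded, so [0] never raises; the [] arm is unreachable)
def get_longest_word_idx_alt (string_ : String) : String × Int :=
  let words := PySem.Str.split₀ string_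
  if words = [] then ("", -1)
  else
    match PySem.List.sorted (PySem.List.enumerate words 0)
        (fun p => -(PySem.Str.len p.2)) with
    | [] => ("", -1)  -- unreachable: sorted of a nonempty list is nonempty
    | (idx, word) :: _ => (word, idx)

-- ===== PRECONDITION & SPEC =====
def Spec_get_longest_word_idx (string_ : String) (out : String × Int) : Prop := out = get_longest_word_idx_alt string_
instance (string_ : String) (out : String × Int) : Decidable (Spec_get_longest_word_idx string_ out) := by unfold Spec_get_longest_word_idx; infer_instance

-- ===== CLAIM =====
def Claim_equal_get_longest_word_idx : Prop := ∀ (string_ : String), Dom_get_longest_word_idx string_ → Spec_get_longest_word_idx string_ (get_longest_word_idx string_)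

-- ===== LEMMAS AND PROOFS =====

-- every piece produced by split₀ is nonempty
theorem split₀_go_ne_nil (s cur : List Char) (acc : List (List Char))
    (hacc : ∀ l ∈ acc, l ≠ []) :
    ∀ l ∈ PySem.Chars.split₀.go s cur acc, l ≠ [] := by
  induction s generalizing cur acc with
  | nil =>
      intro l hl
      simp only [PySem.Chars.split₀.go] at hl
      split_ifs at hl with h
      · exact hacc l (List.mem_reverse.mp hl)
      · rcases List.mem_cons.mp (List.mem_reverse.mp hl) with heq | hmem
        · subst heq
          simp_all [List.isEmpty_iff]
        · exact hacc l hmem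
  | cons c rest ih =>
      intro l hl
      simp only [PySem.Chars.split₀.go] at hl
      split_ifs at hl with h1 h2
      · exact ih [] acc hacc l hl
      · refine ih [] (cur.reverse :: acc) ?_ l hl
        intro l' hl'
        rcases List.mem_cons.mp hl' with heq | hmem
        · subst heq
          simp_all [List.isEmpty_iff]
        · exact hacc l' hmem
      · exact ih (c :: cur) acc hacc l hl

theorem split₀_word_ne_empty (string_ : String) :
    ∀ w ∈ PySem.Str.split₀ string_, PySem.Str.len w ≥ 1 := by
  intro w hw
  unfold PySem.Str.split₀ PySem.Chars.split₀ at hw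
  rcases List.mem_map.mp hw with ⟨l, hl, rfl⟩
  have hne : l ≠ [] := split₀_go_ne_nil _ [] [] (by simp) l hl
  have htl : (String.ofList l).toList = l := by simp
  have hlen : PySem.Str.len (String.ofList l) = (l.length : Int) := by
    rw [PySem.Str.len_eq_length]
    have : (String.ofList l).length = (String.ofList l).toList.length := by
      simp [String.length]
    rw [this, htl]
  rw [hlen]
  have : 0 < l.length := List.length_pos_iff.mpr hne
  omega

-- A's loop step: keep the running best, replace only on strictly longer
def maxStep (o : Option (Int × String)) (x : Int × String) : Option (Int × String) :=
  match o with
  | none => some x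
  | some m => if PySem.Str.len m.2 < PySem.Str.len x.2 then some x else some m

def unpack (o : Option (Int × String)) : String × Int :=
  match o with
  | none => ("", -1)
  | some p => (p.2, p.1)

theorem loop_eq_foldl (ps : List (Int × String)) (w : String) (i : Int) :
    getLWIloop ps w i = unpack (List.foldl maxStep (some (i, w)) ps) := by
  induction ps generalizing w i with
  | nil => simp [getLWIloop, unpack]
  | cons p rest ih =>
      obtain ⟨j, x⟩ := p
      simp only [getLWIloop, List.foldl_cons, maxStep, gt_iff_lt]
      by_cases h : PySem.Str.len w < PySem.Str.len x
      · rw [if_pos h, if_pos h]; exact ih x j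
      · rw [if_neg h, if_neg h]; exact ih w i

-- the first-minimum-by-key step (what the head of a stable insertion sort accumulates)
def minStep {α : Type} (k : α → Int) (o : Option α) (x : α) : Option α :=
  match o with
  | none => some x
  | some m => if k x < k m then some x else some m

theorem head?_insertBy {α : Type} (k : α → Int) (x : α) (acc : List α) :
    (PySem.List.insertBy (fun a b => decide (k a < k b)) x acc).head? =
      minStep k acc.head? x := by
  cases acc with
  | nil => rfl
  | cons y ys =>
      simp only [PySem.List.insertBy, minStep, List.head?]
      by_cases h : k x < k y
      · rw [if_pos (by simpa using h), if_pos h]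
      · rw [if_neg (by simpa using h), if_neg h]

theorem head?_foldl_insertBy {α : Type} (k : α → Int) (xs : List α) :
    ∀ (acc : List α),
      (List.foldl (fun acc x => PySem.List.insertBy (fun a b => decide (k a < k b)) x acc) acc xs).head? =
        List.foldl (minStep k) acc.head? xs := by
  induction xs with
  | nil => intro acc; rfl
  | cons x t ih =>
      intro acc
      simp only [List.foldl_cons]
      rw [ih, head?_insertBy]

-- with key -len, the first-minimum step is exactly A's loop step
theorem minStep_eq_maxStep (o : Option (Int × String)) (x : Int × String) :
    minStep (fun p => -(PySem.Str.len p.2)) o x = maxStep o x := by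
  cases o with
  | none => rfl
  | some m =>
      simp only [minStep, maxStep]
      by_cases h : PySem.Str.len m.2 < PySem.Str.len x.2
      · rw [if_pos (by omega), if_pos h]
      · rw [if_neg (by omega), if_neg h]

-- ===== VERDICT =====
theorem get_longest_word_idx_spec : Claim_equal_get_longest_word_idx := by
  intro string_ _
  unfold Spec_get_longest_word_idx get_longest_word_idx get_longest_word_idx_alt
  cases hwords : PySem.Str.split₀ string_ with
  | nil => simp [PySem.List.enumerate, getLWIloop]
  | cons w t =>
      simp only [reduceCtorEq, if_false]
      have hne : PySem.Str.len w ≥ 1 := by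
        apply split₀_word_ne_empty string_
        rw [hwords]; exact List.mem_cons_self
      have hlen0 : PySem.Str.len "" = 0 := by
        rw [PySem.Str.len_eq_length]; simp
      -- A's side: the loop immediately adopts the first word, then folds maxStep
      have hA : getLWIloop (PySem.List.enumerate (w :: t) 0) "" (-1)
          = unpack (List.foldl maxStep (some (0, w)) (PySem.List.enumerate t 1)) := by
        simp only [PySem.List.enumerate]
        simp only [getLWIloop, gt_iff_lt, hlen0]
        rw [if_pos (by omega)]
        rw [loop_eq_foldl]
        norm_num
      -- B's side: the head of the stable sort is the fold of minStep = maxStep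
      have hhead :
          (PySem.List.sorted (PySem.List.enumerate (w :: t) 0)
              (fun p => -(PySem.Str.len p.2))).head?
            = List.foldl maxStep (some (0, w)) (PySem.List.enumerate t 1) := by
        rw [PySem.List.sorted_eq_foldl_insertBy]
        rw [head?_foldl_insertBy]
        have hfc : List.foldl (minStep (fun p : Int × String => -(PySem.Str.len p.2)))
            = List.foldl maxStep := by
          funext o l
          induction l generalizing o with
          | nil => rfl
          | cons a r ihr => simp only [List.foldl_cons, minStep_eq_maxStep, ihr]
        simp only [PySem.List.enumerate, List.foldl_cons, List.head?]
        rw [hfc]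
        rfl
      cases hs : PySem.List.sorted (PySem.List.enumerate (w :: t) 0)
          (fun p => -(PySem.Str.len p.2)) with
      | nil =>
          exfalso
          have := (PySem.List.sorted_eq_nil_iff _ _ _).mp hs
          simp [PySem.List.enumerate] at this
      | cons m rest =>
          rw [hs] at hhead
          simp only [List.head?] at hhead
          rw [hA, ← hhead]
          obtain ⟨i, wd⟩ := m
          rfl
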